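-- pv_equiv track=rewrite | github.com/drdubel/szkola | lekcje/r_24-25/python/prostokaty/prostokaty.py | maxSzerokosci
-- ===== SOURCE A (Python) =====
-- def maxSzerokosci(prostokaty: list[list[int]]) -> tuple[int, int]:
--     takie_same: dict[int, list[int]] = {}
--
--     max2 = 0
--     max3 = 0
--     max5 = 0
--
--     for prostokat in prostokaty:
--         if prostokat[0] not in takie_same:
--             takie_same[prostokat[0]] = [prostokat[1]]
--
--         else:
--             takie_same[prostokat[0]].append(prostokat[1])
--
--     for wysokosc in takie_same:
--         takie_same[wysokosc].sort(reverse=True)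
--
--         max2 = max(max2, sum(takie_same[wysokosc][:2]))
--         max3 = max(max3, sum(takie_same[wysokosc][:3]))
--         max5 = max(max5, sum(takie_same[wysokosc][:5]))
--
--     return max2, max3, max5
-- ===== SOURCE B (Python) =====
-- def maxSzerokosci(prostokaty):
--     posortowane = sorted(prostokaty, key=lambda p: (p[0], -p[1]))
--     max2 = max3 = max5 = 0
--     reszta = posortowane
--     while reszta:
--         h = reszta[0][0]
--         i = 0
--         grupa = []
--         while i < len(reszta) and reszta[i][0] == h:
--             grupa.append(reszta[i][1])
--             i += 1
--         reszta = reszta[i:]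
--         max2 = max(max2, sum(grupa[:2]))
--         max3 = max(max3, sum(grupa[:3]))
--         max5 = max(max5, sum(grupa[:5]))
--     return max2, max3, max5
-- ===== Notes on version B (the rewrite author's own statement) =====
-- stated objective: alternative
-- what changed: Replaces the dict-of-lists grouping plus a per-height sort with one global sort by (height ascending, width descending) followed by a single segmented scan that sums the first 2/3/5 widths of each height block.
import Mathlib
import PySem

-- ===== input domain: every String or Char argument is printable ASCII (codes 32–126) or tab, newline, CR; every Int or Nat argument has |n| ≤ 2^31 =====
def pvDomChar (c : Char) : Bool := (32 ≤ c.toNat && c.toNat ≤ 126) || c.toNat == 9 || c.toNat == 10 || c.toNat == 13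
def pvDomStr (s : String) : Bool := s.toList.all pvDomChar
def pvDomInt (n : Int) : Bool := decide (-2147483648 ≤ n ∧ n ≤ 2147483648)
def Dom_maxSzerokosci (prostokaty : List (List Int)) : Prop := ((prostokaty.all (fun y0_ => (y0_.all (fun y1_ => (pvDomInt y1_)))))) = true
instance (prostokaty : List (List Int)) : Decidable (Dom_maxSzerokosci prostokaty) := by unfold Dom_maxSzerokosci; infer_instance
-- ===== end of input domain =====

-- B replaces A's dict-of-lists grouping + per-height sorts by one global sort on (height asc, width desc)
-- followed by a segmented scan of the height blocks — an alternative algorithm of the same O(n log n) cost.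


-- shared accessors: prostokat[0] / prostokat[1]; the `.getD 0` default is never reached under Pre_ (length ≥ 2)
def pvH (p : List Int) : Int := (PySem.List.pyGet? p 0).getD 0
def pvW (p : List Int) : Int := (PySem.List.pyGet? p 1).getD 0

-- ===== PORT A =====
def maxSzerokosci (prostokaty : List (List Int)) : List Int :=
  -- takie_same: dict height -> list of widths, in insertion order
  let takie_same : PySem.Dict Int (List Int) :=
    prostokaty.foldl (fun d p =>
      if d.contains (pvH p) = false then
        d.insert (pvH p) [pvW p]
      else
        d.modify (pvH p) [] (fun l => l ++ [pvW p])) PySem.Dict.empty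
  -- second loop: in-place sort of each value, then running maxima (state = dict × (max2, max3, max5))
  let st := takie_same.keys.foldl
    (fun (st : PySem.Dict Int (List Int) × Int × Int × Int) h =>
      let l := PySem.List.sorted (st.1.getD h []) (fun x => x) true
      (st.1.insert h l,
       max st.2.1 (PySem.List.slice l none (some 2)).sum,
       max st.2.2.1 (PySem.List.slice l none (some 3)).sum,
       max st.2.2.2 (PySem.List.slice l none (some 5)).sum))
    (takie_same, 0, 0, 0)
  [st.2.1, st.2.2.1, st.2.2.2]

-- ===== PORT B =====
-- outer while-loop of Source B: peel one height block off the front, update the three maxima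
def pvScan : List (List Int) → Int × Int × Int → Int × Int × Int
  | [], m => m
  | p :: reszta, m =>
    let grupa := ((p :: reszta).takeWhile (fun q => pvH q == pvH p)).map pvW
    pvScan ((p :: reszta).dropWhile (fun q => pvH q == pvH p))
      (max m.1 (PySem.List.slice grupa none (some 2)).sum,
       max m.2.1 (PySem.List.slice grupa none (some 3)).sum,
       max m.2.2 (PySem.List.slice grupa none (some 5)).sum)
termination_by l => l.length
decreasing_by
  simp only [List.dropWhile_cons, pvH, beq_self_eq_true, if_true]
  exact Nat.lt_succ_of_le (List.length_dropWhile_le _ _)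

def maxSzerokosci_alt (prostokaty : List (List Int)) : List Int :=
  let posortowane := PySem.List.sorted2 prostokaty pvH (fun p => -pvW p) false
  let m := pvScan posortowane (0, 0, 0)
  [m.1, m.2.1, m.2.2]

-- ===== PRECONDITION & SPEC =====
-- Pre_ excludes exactly the inputs on which A raises IndexError (an inner list shorter than 2); B raises there too.
def Pre_maxSzerokosci (prostokaty : List (List Int)) : Prop :=
  ∀ p ∈ prostokaty, 2 ≤ p.length
instance (prostokaty : List (List Int)) : Decidable (Pre_maxSzerokosci prostokaty) := by
  unfold Pre_maxSzerokosci; infer_instance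
def pvWitness_maxSzerokosci : List (List Int) := [[1, 2], [1, 3], [2, 5]]

def Spec_maxSzerokosci (prostokaty : List (List Int)) (out : List Int) : Prop := out = maxSzerokosci_alt prostokaty
instance (prostokaty : List (List Int)) (out : List Int) : Decidable (Spec_maxSzerokosci prostokaty out) := by unfold Spec_maxSzerokosci; infer_instance

-- ===== CLAIM (what is proved, stated in full; the proofs are below) =====
def Claim_equal_maxSzerokosci : Prop := ∀ (prostokaty : List (List Int)), Dom_maxSzerokosci prostokaty → Pre_maxSzerokosci prostokaty → Spec_maxSzerokosci prostokaty (maxSzerokosci prostokaty)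

-- ===== LEMMAS AND PROOFS =====

-- the common "update the three maxima with one group of widths" step
def pvStep (m : Int × Int × Int) (g : List Int) : Int × Int × Int :=
  (max m.1 (PySem.List.slice g none (some 2)).sum,
   max m.2.1 (PySem.List.slice g none (some 3)).sum,
   max m.2.2 (PySem.List.slice g none (some 5)).sum)

-- widths of rectangles of height k, in list order
def pvGrp (l : List (List Int)) (k : Int) : List Int :=
  (l.filter (fun p => pvH p == k)).map pvW

-- canonical value: fold pvStep over the distinct heights, group widths sorted descending
def pvCanon (ks : List Int) (l : List (List Int)) (m : Int × Int × Int) : Int × Int × Int :=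
  ks.foldl (fun m k => pvStep m (PySem.List.sorted (pvGrp l k) (fun x => x) true)) m

-- Python's tuple sort key (p[0], -p[1]) as a single lexicographic key
def pvKey (p : List Int) : Lex (Int × Int) := toLex (pvH p, -pvW p)

-- ---------- A-side characterization ----------

theorem pvBuild_eq (prostokaty : List (List Int)) :
    prostokaty.foldl (fun d p =>
      if d.contains (pvH p) = false then
        d.insert (pvH p) [pvW p]
      else
        d.modify (pvH p) [] (fun l => l ++ [pvW p])) PySem.Dict.empty
    = prostokaty.foldl (fun d p => d.modify (pvH p) [] (fun l => l ++ [pvW p])) PySem.Dict.empty := by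
  congr 1
  funext d p
  by_cases hc : d.contains (pvH p) = false
  · simp [hc, PySem.Dict.modify, PySem.Dict.getD_of_not_contains _ _ hc]
  · simp [hc]

theorem pvBuild_getD (prostokaty : List (List Int)) (k : Int) :
    (prostokaty.foldl (fun d p => d.modify (pvH p) [] (fun l => l ++ [pvW p])) PySem.Dict.empty).getD k []
      = pvGrp prostokaty k := by
  have h1 : prostokaty.foldl (fun d p => d.modify (pvH p) [] (fun l => l ++ [pvW p])) PySem.Dict.empty
      = (prostokaty.map (fun p => (pvH p, pvW p))).foldl
          (fun d q => d.modify q.1 [] (fun l => l ++ [q.2])) PySem.Dict.empty := by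
    rw [List.foldl_map]
  rw [h1, PySem.Dict.getD_foldl_modify_append, PySem.Dict.getD_empty, List.filter_map, List.map_map]
  simp [pvGrp, Function.comp_def]

theorem pvBuild_keys (prostokaty : List (List Int)) :
    (prostokaty.foldl (fun d p => d.modify (pvH p) [] (fun l => l ++ [pvW p])) PySem.Dict.empty).keys
      = PySem.Set.ofList (prostokaty.map pvH) := by
  rw [PySem.Dict.keys_foldl_modify_key prostokaty pvH [] (fun _ p => (fun l => l ++ [pvW p]))]
  simp [PySem.Dict.keys_empty, PySem.Set.update, PySem.Set.ofList_eq_foldl]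

theorem pvLoop2 (prostokaty : List (List Int)) :
    ∀ (ks : List Int) (d : PySem.Dict Int (List Int)) (m : Int × Int × Int),
      ks.Nodup → (∀ k ∈ ks, d.getD k [] = pvGrp prostokaty k) →
      (ks.foldl
        (fun (st : PySem.Dict Int (List Int) × Int × Int × Int) h =>
          let l := PySem.List.sorted (st.1.getD h []) (fun x => x) true
          (st.1.insert h l,
           max st.2.1 (PySem.List.slice l none (some 2)).sum,
           max st.2.2.1 (PySem.List.slice l none (some 3)).sum,
           max st.2.2.2 (PySem.List.slice l none (some 5)).sum))
        (d, m)).2 = pvCanon ks prostokaty m := by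
  intro ks
  induction ks with
  | nil => intro d m _ _; simp [pvCanon]
  | cons h t ih =>
    intro d m hnd hgd
    simp only [List.foldl_cons]
    have hd : d.getD h [] = pvGrp prostokaty h := hgd h (by simp)
    have hgd' : ∀ k ∈ t, (d.insert h (PySem.List.sorted (d.getD h []) (fun x => x) true)).getD k []
        = pvGrp prostokaty k := by
      intro k hk
      rw [PySem.Dict.getD_insert_of_ne]
      · exact hgd k (by simp [hk])
      · rintro rfl; exact (List.nodup_cons.mp hnd).1 hk
    have := ih (d.insert h (PySem.List.sorted (d.getD h []) (fun x => x) true))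
      (max m.1 (PySem.List.slice (PySem.List.sorted (d.getD h []) (fun x => x) true) none (some 2)).sum,
       max m.2.1 (PySem.List.slice (PySem.List.sorted (d.getD h []) (fun x => x) true) none (some 3)).sum,
       max m.2.2 (PySem.List.slice (PySem.List.sorted (d.getD h []) (fun x => x) true) none (some 5)).sum)
      (List.nodup_cons.mp hnd).2 hgd'
    rw [this]
    simp only [pvCanon, List.foldl_cons, hd, pvStep]

theorem pvA_canon (prostokaty : List (List Int)) :
    maxSzerokosci prostokaty =
      (let m := pvCanon (PySem.Set.ofList (prostokaty.map pvH)) prostokaty (0,0,0)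
       [m.1, m.2.1, m.2.2]) := by
  simp only [maxSzerokosci, pvBuild_eq]
  have hnd : (prostokaty.foldl (fun d p => d.modify (pvH p) [] (fun l => l ++ [pvW p])) PySem.Dict.empty).keys.Nodup :=
    PySem.Dict.nodup_keys_foldl_modify_key prostokaty pvH [] (fun _ p => (fun l => l ++ [pvW p]))
      PySem.Dict.empty PySem.Dict.nodup_keys_empty
  rw [pvLoop2 prostokaty _ _ _ hnd (fun k _ => pvBuild_getD prostokaty k), pvBuild_keys]

-- ---------- B-side characterization ----------
theorem pvSorted2_eq (l : List (List Int)) :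
    PySem.List.sorted2 l pvH (fun p => -pvW p) false = PySem.List.sorted l pvKey := by
  rw [PySem.List.sorted_eq_foldl_insertBy]
  simp only [PySem.List.sorted2, if_neg (by decide : ¬ (false = true))]
  have hb : (fun (a b : List Int) => decide (pvH a < pvH b) || !decide (pvH b < pvH a) && decide (-pvW a < -pvW b))
      = (fun a b => decide (pvKey a < pvKey b)) := by
    funext a b
    simp only [← decide_not, ← Bool.decide_and, ← Bool.decide_or, decide_eq_decide]
    rw [pvKey, pvKey, Prod.Lex.lt_iff]; simp only [ofLex_toLex]
    constructor
    · rintro (h | ⟨h1, h2⟩)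
      · exact Or.inl h
      · rcases lt_or_ge (pvH a) (pvH b) with hlt | hge
        · exact Or.inl hlt
        · exact Or.inr ⟨by omega, h2⟩
    · rintro (h | ⟨h1, h2⟩)
      · exact Or.inl h
      · exact Or.inr ⟨by omega, h2⟩
  rw [hb]

-- add over a list all of whose elements are h collapses to [h]
theorem pvFoldAdd_const (h : Int) : ∀ (as : List Int), (∀ a ∈ as, a = h) →
    List.foldl PySem.Set.add [h] as = [h] := by
  intro as
  induction as with
  | nil => intro _; rfl
  | cons a t ih =>
    intro hall
    have ha : a = h := hall a (by simp)
    subst ha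
    have : PySem.Set.add [a] a = [a] := by simp [PySem.Set.add, PySem.Set.contains]
    simpa [this] using ih (fun x hx => hall x (by simp [hx]))

theorem pvFoldAdd_cons (h : Int) : ∀ (bs s : List Int), h ∉ bs →
    List.foldl PySem.Set.add (h :: s) bs = h :: List.foldl PySem.Set.add s bs := by
  intro bs
  induction bs with
  | nil => intro s _; rfl
  | cons b t ih =>
    intro s hnb
    have hbh : (b == h) = false := by
      simp only [beq_eq_false_iff_ne]; rintro rfl; exact hnb (by simp)
    have hstep : PySem.Set.add (h :: s) b = h :: PySem.Set.add s b := by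
      simp only [PySem.Set.add, PySem.Set.contains, List.contains_cons, hbh, Bool.false_or]
      split <;> simp
    simp only [List.foldl_cons, hstep]
    exact ih _ (fun hx => hnb (by simp [hx]))

theorem pvOfList_block (h : Int) (as bs : List Int) (hne : as ≠ [])
    (hall : ∀ a ∈ as, a = h) (hnb : h ∉ bs) :
    PySem.Set.ofList (as ++ bs) = h :: PySem.Set.ofList bs := by
  rw [PySem.Set.ofList_eq_foldl, PySem.Set.ofList_eq_foldl, List.foldl_append]
  obtain ⟨a, t, rfl⟩ := List.exists_cons_of_ne_nil hne
  have ha : a = h := hall a (by simp)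
  subst ha
  have h0 : PySem.Set.add [] a = [a] := by simp [PySem.Set.add, PySem.Set.contains]
  rw [List.foldl_cons, h0, pvFoldAdd_const a t (fun x hx => hall x (by simp [hx]))]
  exact pvFoldAdd_cons a bs [] hnb

theorem pvKey_le_H {a b : List Int} (h : pvKey a ≤ pvKey b) : pvH a ≤ pvH b := by
  rw [pvKey, pvKey, Prod.Lex.le_iff] at h
  simp only [ofLex_toLex] at h
  rcases h with h | ⟨h1, _⟩
  · exact le_of_lt h
  · exact le_of_eq h1

theorem pvScan_fold : ∀ (s : List (List Int)) (m : Int × Int × Int),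
    List.Pairwise (fun a b => pvKey a ≤ pvKey b) s →
    pvScan s m = (PySem.Set.ofList (s.map pvH)).foldl
        (fun m k => pvStep m ((s.filter (fun p => pvH p == k)).map pvW)) m := by
  have main : ∀ (n : Nat) (s : List (List Int)), s.length ≤ n → ∀ (m : Int × Int × Int),
      List.Pairwise (fun a b => pvKey a ≤ pvKey b) s →
      pvScan s m = (PySem.Set.ofList (s.map pvH)).foldl
          (fun m k => pvStep m ((s.filter (fun p => pvH p == k)).map pvW)) m := by
    intro n
    induction n with
    | zero =>
      intro s hs m _
      have : s = [] := List.eq_nil_of_length_eq_zero (Nat.le_zero.mp hs)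
      subst this
      simp [pvScan, PySem.Set.ofList_eq_foldl]
    | succ n ih =>
      intro s hs m hpw
      match s with
      | [] => simp [pvScan, PySem.Set.ofList_eq_foldl]
      | p :: rest =>
        have hpp : (fun q => pvH q == pvH p) p = true := by simp
        have hdw : List.dropWhile (fun q => pvH q == pvH p) (p :: rest)
            = List.dropWhile (fun q => pvH q == pvH p) rest := by
          rw [List.dropWhile_cons, if_pos hpp]
        have hts : ∀ q ∈ List.takeWhile (fun q => pvH q == pvH p) (p :: rest), pvH q = pvH p := by
          intro q hq
          simpa using List.mem_takeWhile_imp hq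
        have hrsub : (List.dropWhile (fun q => pvH q == pvH p) (p :: rest)).Sublist rest := by
          rw [hdw]; exact List.dropWhile_sublist _
        have hpwr : List.Pairwise (fun a b => pvKey a ≤ pvKey b)
            (List.dropWhile (fun q => pvH q == pvH p) (p :: rest)) :=
          List.Pairwise.sublist (hrsub.trans (List.sublist_cons_self p rest)) hpw
        -- strictly larger heights in the dropped part
        have hlt : ∀ q ∈ List.dropWhile (fun q => pvH q == pvH p) (p :: rest), pvH p < pvH q := by
          cases hcr : List.dropWhile (fun q => pvH q == pvH p) (p :: rest) with
          | nil => intro q hq; cases hq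
          | cons q0 r' =>
            have hq0f : (fun q => pvH q == pvH p) q0 = false := by
              have hne : List.dropWhile (fun q => pvH q == pvH p) (p :: rest) ≠ [] := by
                rw [hcr]; exact List.cons_ne_nil _ _
              have := List.head_dropWhile_not (fun q => pvH q == pvH p) hne
              simpa [hcr] using this
            have hq0ne : pvH q0 ≠ pvH p := by simpa using hq0f
            have hrsub2 := hrsub
            rw [hcr] at hrsub2
            have hq0mem : q0 ∈ rest := hrsub2.mem (by simp)
            have hplt : pvH p < pvH q0 :=
              lt_of_le_of_ne (pvKey_le_H ((List.pairwise_cons.mp hpw).1 _ hq0mem)) (Ne.symm hq0ne)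
            intro q hq
            rcases List.mem_cons.mp hq with rfl | hq'
            · exact hplt
            · have hpwr2 := hpwr
              rw [hcr] at hpwr2
              have : pvKey q0 ≤ pvKey q := (List.pairwise_cons.mp hpwr2).1 q hq'
              exact lt_of_lt_of_le hplt (pvKey_le_H this)
        -- the takeWhile prefix is nonempty and carries height pvH p
        have htw : List.takeWhile (fun q => pvH q == pvH p) (p :: rest)
            = p :: List.takeWhile (fun q => pvH q == pvH p) rest := by
          rw [List.takeWhile_cons, if_pos hpp]
        -- filter of the whole list at height pvH p is the takeWhile prefix
        have hfs : (p :: rest).filter (fun x => pvH x == pvH p)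
            = List.takeWhile (fun q => pvH q == pvH p) (p :: rest) := by
          conv_lhs => rw [← List.takeWhile_append_dropWhile (p := fun q => pvH q == pvH p) (l := p :: rest)]
          rw [List.filter_append]
          rw [List.filter_eq_self.mpr (fun a ha => by simp [hts a ha]),
              List.filter_eq_nil_iff.mpr (fun a ha => by simp [(hlt a ha).ne']),
              List.append_nil]
        -- distinct heights: pvH p, then those of the dropped part
        have hofl : PySem.Set.ofList ((p :: rest).map pvH)
            = pvH p :: PySem.Set.ofList ((List.dropWhile (fun q => pvH q == pvH p) (p :: rest)).map pvH) := by
          conv_lhs => rw [← List.takeWhile_append_dropWhile (p := fun q => pvH q == pvH p) (l := p :: rest)]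
          rw [List.map_append]
          apply pvOfList_block
          · rw [htw]; simp
          · intro a ha
            rcases List.mem_map.mp ha with ⟨q, hq, rfl⟩
            exact hts q hq
          · intro ha
            rcases List.mem_map.mp ha with ⟨q, hq, hqe⟩
            exact absurd hqe (hlt q hq).ne'
        -- filters at the later heights ignore the first block
        have hcong : ∀ (acc : Int × Int × Int),
            ∀ k ∈ PySem.Set.ofList ((List.dropWhile (fun q => pvH q == pvH p) (p :: rest)).map pvH),
            pvStep acc (((p :: rest).filter (fun x => pvH x == k)).map pvW)
              = pvStep acc (((List.dropWhile (fun q => pvH q == pvH p) (p :: rest)).filter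
                  (fun x => pvH x == k)).map pvW) := by
          intro acc k hk
          rcases List.mem_map.mp ((PySem.Set.mem_ofList _ _).mp hk) with ⟨q, hq, rfl⟩
          have hgt : pvH p < pvH q := hlt q hq
          congr 2
          conv_lhs => rw [← List.takeWhile_append_dropWhile (p := fun q => pvH q == pvH p) (l := p :: rest)]
          rw [List.filter_append,
              List.filter_eq_nil_iff.mpr (fun a ha => by simp [hts a ha]; omega),
              List.nil_append]
        -- put it together
        rw [pvScan, hofl, List.foldl_cons,
            PySem.List.foldl_congr_mem _ _ _ _ hcong]
        have hlen : (List.dropWhile (fun q => pvH q == pvH p) (p :: rest)).length ≤ n := by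
          have := List.Sublist.length_le hrsub
          simp only [List.length_cons] at hs
          omega
        rw [ih _ hlen _ hpwr]
        congr 1
        rw [hfs]
        rfl
  intro s m hpw
  exact main s.length s le_rfl m hpw

theorem pvGroup_sorted (prostokaty : List (List Int)) (k : Int) :
    ((PySem.List.sorted prostokaty pvKey).filter (fun p => pvH p == k)).map pvW
      = PySem.List.sorted (pvGrp prostokaty k) (fun x => x) true := by
  have hperm : (PySem.List.sorted prostokaty pvKey).Perm prostokaty :=
    PySem.List.sorted_perm prostokaty pvKey false
  have hp1 : (((PySem.List.sorted prostokaty pvKey).filter (fun p => pvH p == k)).map pvW).Perm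
      (pvGrp prostokaty k) := (hperm.filter _).map pvW
  have hu_perm : (PySem.List.sorted (pvGrp prostokaty k) (fun x => x) true).Perm (pvGrp prostokaty k) :=
    PySem.List.sorted_perm _ _ true
  have hu_pw : List.Pairwise (fun a b : Int => b ≤ a)
      (PySem.List.sorted (pvGrp prostokaty k) (fun x => x) true) :=
    PySem.List.sorted_pairwise_rev _ _
  have hf_pw : List.Pairwise (fun a b : Int => b ≤ a)
      (((PySem.List.sorted prostokaty pvKey).filter (fun p => pvH p == k)).map pvW) := by
    have hs_pw : List.Pairwise (fun a b => pvKey a ≤ pvKey b)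
        ((PySem.List.sorted prostokaty pvKey).filter (fun p => pvH p == k)) :=
      List.Pairwise.sublist List.filter_sublist (PySem.List.sorted_pairwise prostokaty pvKey)
    have hW : List.Pairwise (fun a b => pvW b ≤ pvW a)
        ((PySem.List.sorted prostokaty pvKey).filter (fun p => pvH p == k)) := by
      refine hs_pw.imp_of_mem ?_
      intro a b ha hb hab
      have hka : pvH a = k := by simpa using (List.mem_filter.mp ha).2
      have hkb : pvH b = k := by simpa using (List.mem_filter.mp hb).2
      rw [pvKey, pvKey, Prod.Lex.le_iff] at hab
      simp only [ofLex_toLex] at hab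
      rcases hab with h | ⟨_, h2⟩
      · omega
      · omega
    exact List.Pairwise.map pvW (fun a b h => h) hW
  refine PySem.List.eq_of_perm_of_pairwise_le_of_injective (fun x : Int => -x) neg_injective
    (hp1.trans hu_perm.symm) ?_ ?_
  · exact hf_pw.imp (fun {a b} h => by show -a ≤ -b; omega)
  · exact hu_pw.imp (fun {a b} h => by show -a ≤ -b; omega)

theorem pvB_canon (prostokaty : List (List Int)) :
    maxSzerokosci_alt prostokaty =
      (let m := pvCanon
          (PySem.Set.ofList ((PySem.List.sorted2 prostokaty pvH (fun p => -pvW p) false).map pvH))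
          prostokaty (0,0,0)
       [m.1, m.2.1, m.2.2]) := by
  simp only [maxSzerokosci_alt, pvSorted2_eq]
  rw [pvScan_fold _ _ (PySem.List.sorted_pairwise prostokaty pvKey)]
  have hfun : (fun (m : Int × Int × Int) k =>
        pvStep m (((PySem.List.sorted prostokaty pvKey).filter (fun p => pvH p == k)).map pvW))
      = (fun m k => pvStep m (PySem.List.sorted (pvGrp prostokaty k) (fun x => x) true)) := by
    funext m k
    rw [pvGroup_sorted]
  rw [hfun]
  rfl

-- ---------- order-invariance of the canonical fold ----------

theorem pvCanon_perm (ks ks' : List Int) (l : List (List Int)) (m : Int × Int × Int)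
    (h : ks.Perm ks') : pvCanon ks l m = pvCanon ks' l m := by
  obtain ⟨a, b, c⟩ := m
  simp only [pvCanon, pvStep]
  rw [PySem.List.foldl_prod_mk (f := fun x k => max x (PySem.List.slice (PySem.List.sorted (pvGrp l k) (fun x => x) true) none (some 2)).sum)
        (g := fun (y : Int × Int) k => (max y.1 (PySem.List.slice (PySem.List.sorted (pvGrp l k) (fun x => x) true) none (some 3)).sum,
                                        max y.2 (PySem.List.slice (PySem.List.sorted (pvGrp l k) (fun x => x) true) none (some 5)).sum)),
      PySem.List.foldl_prod_mk (f := fun x k => max x (PySem.List.slice (PySem.List.sorted (pvGrp l k) (fun x => x) true) none (some 2)).sum)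
        (g := fun (y : Int × Int) k => (max y.1 (PySem.List.slice (PySem.List.sorted (pvGrp l k) (fun x => x) true) none (some 3)).sum,
                                        max y.2 (PySem.List.slice (PySem.List.sorted (pvGrp l k) (fun x => x) true) none (some 5)).sum)),
      PySem.List.foldl_prod_mk (f := fun x k => max x (PySem.List.slice (PySem.List.sorted (pvGrp l k) (fun x => x) true) none (some 3)).sum)
        (g := fun (y : Int) k => max y (PySem.List.slice (PySem.List.sorted (pvGrp l k) (fun x => x) true) none (some 5)).sum),
      PySem.List.foldl_prod_mk (f := fun x k => max x (PySem.List.slice (PySem.List.sorted (pvGrp l k) (fun x => x) true) none (some 3)).sum)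
        (g := fun (y : Int) k => max y (PySem.List.slice (PySem.List.sorted (pvGrp l k) (fun x => x) true) none (some 5)).sum)]
  have key : ∀ (A : Int → Int) (x0 : Int),
      ks.foldl (fun x k => max x (A k)) x0 = ks'.foldl (fun x k => max x (A k)) x0 := by
    intro A x0
    rw [← List.foldl_map (f := A) (g := max), ← List.foldl_map (f := A) (g := max)]
    exact (h.map A).foldl_eq x0
  rw [key, key, key]

-- ===== VERDICT (by name: the statement is the Claim_ definition above) =====
theorem maxSzerokosci_spec : Claim_equal_maxSzerokosci := by
  intro prostokaty _ _
  unfold Spec_maxSzerokosci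
  rw [pvA_canon, pvB_canon]
  have hperm : (PySem.Set.ofList (prostokaty.map pvH)).Perm
      (PySem.Set.ofList ((PySem.List.sorted2 prostokaty pvH (fun p => -pvW p) false).map pvH)) := by
    rw [List.perm_ext_iff_of_nodup (PySem.Set.nodup_ofList _) (PySem.Set.nodup_ofList _)]
    intro a
    rw [PySem.Set.mem_ofList, PySem.Set.mem_ofList]
    exact ((PySem.List.sorted2_perm prostokaty pvH (fun p => -pvW p) false).map pvH).mem_iff.symm
  simp only [pvCanon_perm _ _ _ _ hperm]
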